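-- pv_equiv track=rewrite | github.com/StewartChicken/APPM4600 | Project/orthoPoly.py | generate_chebychev_polynomial
-- ===== SOURCE A (Python) =====
-- def generate_chebychev_polynomial(n):
--     # Base cases
--     # The Chebyshev polynomial of degree 0 is 1
--     # The Chebyshev polynomial of degree 1 is x
--     if n == 0:
--         return [1]
--     elif n == 1:
--         return [0, 1]  # 0*(1) + 1*(x)
--
--     # Initialize P0 and P1 as lists of coefficients
--     # These will be used to start the recursive construction of the Chebyshev polynomial
--     P0 = [1]
--     P1 = [0, 1]
--
--     # Chebyshev polynomial obey the following three term recurrence relation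
--     #
--     # P_{n+1}(x) = 2*x*P_n(x) - P_{n-1}(x)
--
--     # This loop is used to iteratively generate the nth order Chebyshev polynomial
--     # For each iteration, k is the degree of the polynomial that will be generated
--     for k in range(2, n + 1):
--         # Start by creating a new list of coefficients for P_k
--         P_k = [0] * (k + 1)  # Degree k polynomial has (k+1) coefficients
--
--         # First, for the x-term 2*x*P_k(x)
--         for i in range(len(P1)):
--             P_k[i + 1] += 2 * P1[i]
--
--         # Second, for the P_{k-1}(x) term -P_{k-1}(x)
--         for i in range(len(P0)):
--             P_k[i] -= P0[i]
--
--         # Update P0 and P1 for the next iteration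
--         P0, P1 = P1, P_k
--
--     # The final P_k is the Legendre polynomial of degree n
--     return P_k
-- ===== SOURCE B (Python) =====
-- def generate_chebychev_polynomial(n):
--     # Closed-form coefficients of T_n: the coefficient of x^(n-2k) is
--     # (-1)^k * 2^(n-2k-1) * n/(n-k) * C(n-k, k); computed incrementally in O(n)
--     # (exact integer ratio between consecutive coefficients), instead of the
--     # O(n^2) three-term recurrence on whole coefficient lists.
--     if n == 0:
--         return [1]
--     coeffs = [0] * (n + 1)
--     c = 2 ** (n - 1)
--     for k in range(n // 2):
--         coeffs[n - 2 * k] = c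
--         c = -c * (n - 2 * k) * (n - 2 * k - 1) // (4 * (k + 1) * (n - k - 1))
--     coeffs[n % 2] = c
--     return coeffs
-- ===== Notes on version B (the rewrite author's own statement) =====
-- stated objective: faster
-- what changed: Replaces the O(n^2) three-term recurrence over whole coefficient lists by the closed-form coefficient formula (-1)^k 2^(n-2k-1) n/(n-k) C(n-k,k), evaluated in one O(n) pass with an exact incremental integer ratio between consecutive nonzero coefficients.
import Mathlib
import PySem

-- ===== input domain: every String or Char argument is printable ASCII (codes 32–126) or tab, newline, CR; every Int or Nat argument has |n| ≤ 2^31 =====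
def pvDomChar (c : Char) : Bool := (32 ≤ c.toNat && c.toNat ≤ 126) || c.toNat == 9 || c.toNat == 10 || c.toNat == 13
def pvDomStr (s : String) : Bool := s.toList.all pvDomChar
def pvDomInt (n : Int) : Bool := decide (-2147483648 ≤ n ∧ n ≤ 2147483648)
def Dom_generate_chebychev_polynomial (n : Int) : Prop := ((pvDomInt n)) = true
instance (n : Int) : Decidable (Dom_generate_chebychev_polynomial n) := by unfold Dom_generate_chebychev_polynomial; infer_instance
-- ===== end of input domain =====

-- B replaces A's O(n^2) three-term recurrence on coefficient lists by the closed-form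
-- Chebyshev coefficient formula evaluated in one pass with exact incremental integer ratios.

-- ===== PORT A =====
-- one iteration of A's outer loop body: build P_k from P0, P1 (k = degree)
def stepA (P0 P1 : List Int) (k : Int) : List Int :=
  let pk0 : List Int := List.replicate (k + 1).toNat 0
  let pk1 := (PySem.List.pyRange 0 (P1.length) 1).foldl
      (fun acc i => PySem.List.pySetD acc (i + 1)
        (PySem.List.pyGetD acc (i + 1) 0 + 2 * PySem.List.pyGetD P1 i 0)) pk0
  (PySem.List.pyRange 0 (P0.length) 1).foldl
      (fun acc i => PySem.List.pySetD acc i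
        (PySem.List.pyGetD acc i 0 - PySem.List.pyGetD P0 i 0)) pk1

def generate_chebychev_polynomial (n : Int) : List Int :=
  if n = 0 then [1]
  else if n = 1 then [0, 1]
  else
    -- for k in range(2, n+1): P0, P1 = P1, P_k   — return P_k (= final P1 when the loop ran;
    -- for n < 0 Python raises NameError, excluded by Pre_)
    (((PySem.List.pyRange 2 (n + 1) 1).foldl
        (fun (st : List Int × List Int) k => (st.2, stepA st.1 st.2 k))
        ([1], [0, 1]))).2

-- ===== PORT B =====
def generate_chebychev_polynomial_alt (n : Int) : List Int :=
  if n = 0 then [1]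
  else
    let st := (PySem.List.pyRange 0 (PySem.Int.floordiv n 2) 1).foldl
      (fun (st : List Int × Int) k =>
        (PySem.List.pySetD st.1 (n - 2 * k) st.2,
         PySem.Int.floordiv (-st.2 * (n - 2 * k) * (n - 2 * k - 1))
                            (4 * (k + 1) * (n - k - 1))))
      (List.replicate (n + 1).toNat 0, 2 ^ (n - 1).toNat)
    PySem.List.pySetD st.1 (PySem.Int.mod n 2) st.2

-- ===== PRECONDITION & SPEC =====
-- Python A raises UnboundLocalError for n < 0 (the loop never binds P_k); B raises IndexError there too.
def Pre_generate_chebychev_polynomial (n : Int) : Prop := 0 ≤ n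
instance (n : Int) : Decidable (Pre_generate_chebychev_polynomial n) := by
  unfold Pre_generate_chebychev_polynomial; infer_instance
def pvWitness_generate_chebychev_polynomial : Int := 3

def Spec_generate_chebychev_polynomial (n : Int) (out : List Int) : Prop := out = generate_chebychev_polynomial_alt n
instance (n : Int) (out : List Int) : Decidable (Spec_generate_chebychev_polynomial n out) := by unfold Spec_generate_chebychev_polynomial; infer_instance

-- ===== CLAIM (what is proved, stated in full; the proofs are below) =====
def Claim_equal_generate_chebychev_polynomial : Prop := ∀ (n : Int), Dom_generate_chebychev_polynomial n → Pre_generate_chebychev_polynomial n → Spec_generate_chebychev_polynomial n (generate_chebychev_polynomial n)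

-- ===== LEMMAS AND PROOFS =====

-- the "carry" factor: hC n k = n/(n-k) * C(n-k,k) in integer form
def hC (n k : ℕ) : ℕ :=
  if k = 0 then 1 else (n - k).choose k + (n - k - 1).choose (k - 1)

-- gC n k = coefficient of x^(n-2k) in T_n (n ≥ 1)
def gC (n k : ℕ) : ℤ :=
  if n = 2 * k then (-1) ^ k else (-1) ^ k * 2 ^ (n - 2 * k - 1) * (hC n k : ℤ)

-- coefficient of x^i in T_m
def coefC (m i : ℕ) : ℤ :=
  if (m - i) % 2 = 0 ∧ i ≤ m then gC m ((m - i) / 2) else 0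

def LC (m : ℕ) : List ℤ := (List.range (m + 1)).map (coefC m)

lemma length_LC (m : ℕ) : (LC m).length = m + 1 := by
  simp [LC]

lemma LC_zero : LC 0 = [1] := by decide
lemma LC_one : LC 1 = [0, 1] := by decide

-- ---- arithmetic identities ----

lemma htwo (k : ℕ) (hk : 1 ≤ k) : hC (2 * k) k = 2 := by
  unfold hC
  rw [if_neg (by omega)]
  rw [show 2 * k - k = k from by omega, show k - 1 = k - 1 from rfl]
  have h2 : 2 * k - k - 1 = k - 1 := by omega
  simp [Nat.choose_self]

lemma hfact (n k : ℕ) (hn : 1 ≤ n) (hk : 2 * k ≤ n) :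
    hC n k * (k.factorial * (n - 2 * k).factorial) = n * (n - k - 1).factorial := by
  rcases Nat.eq_zero_or_pos k with rfl | hkpos
  · obtain ⟨n', rfl⟩ : ∃ n', n = n' + 1 := ⟨n - 1, by omega⟩
    simp [hC, Nat.factorial_succ]
  · obtain ⟨k', rfl⟩ : ∃ k', k = k' + 1 := ⟨k - 1, by omega⟩
    obtain ⟨r, rfl⟩ : ∃ r, n = 2 * k' + 2 + r := ⟨n - (2 * k' + 2), by omega⟩
    unfold hC
    rw [if_neg (by omega)]
    rw [show 2 * k' + 2 + r - (k' + 1) = k' + 1 + r from by omega,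
        show k' + 1 + r - 1 = k' + r from by omega,
        show k' + 1 - 1 = k' from by omega,
        show 2 * k' + 2 + r - 2 * (k' + 1) = r from by omega]
    have e1 := Nat.choose_mul_factorial_mul_factorial (show k' + 1 ≤ k' + 1 + r from by omega)
    rw [show k' + 1 + r - (k' + 1) = r from by omega] at e1
    have e2 := Nat.choose_mul_factorial_mul_factorial (show k' ≤ k' + r from by omega)
    rw [show k' + r - k' = r from by omega] at e2
    calc ((k' + 1 + r).choose (k' + 1) + (k' + r).choose k') * ((k' + 1).factorial * r.factorial)
        = ((k' + 1 + r).choose (k' + 1) * (k' + 1).factorial * r.factorial)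
          + ((k' + r).choose k' * k'.factorial * r.factorial) * (k' + 1) := by
          rw [Nat.factorial_succ]; ring
      _ = (k' + 1 + r).factorial + (k' + r).factorial * (k' + 1) := by rw [e1, e2]
      _ = (k' + r).factorial * (k' + r + 1) + (k' + r).factorial * (k' + 1) := by
          rw [show k' + 1 + r = (k' + r) + 1 from by omega, Nat.factorial_succ]; ring
      _ = (2 * k' + 2 + r) * (k' + r).factorial := by ring

lemma hrec (m k : ℕ) (hk : 1 ≤ k) (hkm : 2 * k ≤ m) :
    hC (m + 1) k = hC m k + hC (m - 1) (k - 1) := by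
  rcases Nat.lt_or_ge k 2 with hk2 | hk2
  · -- k = 1
    obtain rfl : k = 1 := by omega
    obtain ⟨r, rfl⟩ : ∃ r, m = 2 + r := ⟨m - 2, by omega⟩
    unfold hC
    rw [if_neg (by omega), if_neg (by omega), if_pos (by omega)]
    simp only [show 2 + r + 1 - 1 = r + 2 from by omega, show r + 2 - 1 = r + 1 from by omega,
        show 2 + r - 1 = r + 1 from by omega, show r + 1 - 1 = r from by omega,
        show (1 : ℕ) - 1 = 0 from rfl]
    simp [Nat.choose_one_right]
  · obtain ⟨k'', rfl⟩ : ∃ k'', k = k'' + 2 := ⟨k - 2, by omega⟩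
    obtain ⟨r, rfl⟩ : ∃ r, m = 2 * k'' + 4 + r := ⟨m - (2 * k'' + 4), by omega⟩
    unfold hC
    rw [if_neg (by omega), if_neg (by omega), if_neg (by omega)]
    simp only [show 2 * k'' + 4 + r + 1 - (k'' + 2) = k'' + 3 + r from by omega,
        show 2 * k'' + 4 + r - (k'' + 2) = k'' + 2 + r from by omega,
        show 2 * k'' + 4 + r - 1 = 2 * k'' + 3 + r from by omega,
        show k'' + 2 - 1 = k'' + 1 from by omega,
        show 2 * k'' + 3 + r - (k'' + 1) = k'' + 2 + r from by omega,
        show k'' + 3 + r - 1 = k'' + 2 + r from by omega,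
        show k'' + 2 + r - 1 = k'' + 1 + r from by omega,
        show k'' + 1 - 1 = k'' from by omega]
    have p1 : (k'' + 3 + r).choose (k'' + 2) =
        (k'' + 2 + r).choose (k'' + 1) + (k'' + 2 + r).choose (k'' + 1 + 1) := by
      rw [show k'' + 3 + r = k'' + 2 + r + 1 from by omega,
          show (k'' + 2 : ℕ) = k'' + 1 + 1 from by omega]
      exact Nat.choose_succ_succ _ _
    have p2 : (k'' + 2 + r).choose (k'' + 1) =
        (k'' + 1 + r).choose k'' + (k'' + 1 + r).choose (k'' + 1) := by
      rw [show k'' + 2 + r = k'' + 1 + r + 1 from by omega]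
      exact Nat.choose_succ_succ _ _
    rw [show (k'' + 2 : ℕ) = k'' + 1 + 1 from by omega] at *
    rw [p1, p2]
    ring

lemma hstep (n k : ℕ) (hn : 1 ≤ n) (hk : 2 * (k + 1) ≤ n) :
    hC n (k + 1) * ((k + 1) * (n - k - 1)) = hC n k * ((n - 2 * k) * (n - 2 * k - 1)) := by
  obtain ⟨r, rfl⟩ : ∃ r, n = 2 * k + 2 + r := ⟨n - (2 * k + 2), by omega⟩
  have h1 := hfact (2 * k + 2 + r) (k + 1) (by omega) (by omega)
  have h2 := hfact (2 * k + 2 + r) k (by omega) (by omega)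
  rw [show 2 * k + 2 + r - 2 * (k + 1) = r from by omega,
      show 2 * k + 2 + r - (k + 1) - 1 = k + r from by omega] at h1

  rw [show 2 * k + 2 + r - 2 * k = r + 2 from by omega,
      show 2 * k + 2 + r - k - 1 = k + 1 + r from by omega] at h2
  apply Nat.eq_of_mul_eq_mul_right
    (show 0 < k.factorial * r.factorial from
      Nat.mul_pos k.factorial_pos r.factorial_pos)
  simp only [show 2 * k + 2 + r - k - 1 = k + 1 + r from by omega,
      show 2 * k + 2 + r - 2 * k = r + 2 from by omega,
      show r + 2 - 1 = r + 1 from by omega]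
  calc hC (2 * k + 2 + r) (k + 1) * ((k + 1) * (k + 1 + r)) * (k.factorial * r.factorial)
      = (hC (2 * k + 2 + r) (k + 1) * ((k + 1).factorial * r.factorial)) * (k + 1 + r) := by
        rw [Nat.factorial_succ]; ring
    _ = ((2 * k + 2 + r) * (k + r).factorial) * (k + 1 + r) := by rw [h1]
    _ = (2 * k + 2 + r) * ((k + r).factorial * (k + r + 1)) := by ring
    _ = (2 * k + 2 + r) * (k + 1 + r).factorial := by
        rw [show k + 1 + r = (k + r) + 1 from by omega, Nat.factorial_succ]; ring
    _ = (hC (2 * k + 2 + r) k * (k.factorial * (r + 2).factorial)) := by rw [h2]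
    _ = hC (2 * k + 2 + r) k * ((r + 2) * (r + 1)) * (k.factorial * r.factorial) := by
        rw [show (r + 2 : ℕ) = (r + 1) + 1 from rfl, Nat.factorial_succ, Nat.factorial_succ]
        ring

-- B-side exactness: the ratio step is an exact integer division
lemma estep (n k : ℕ) (hn : 1 ≤ n) (hk : 2 * (k + 1) ≤ n) :
    gC n (k + 1) * (4 * ((k : ℤ) + 1) * ((n : ℤ) - k - 1)) =
    -(gC n k) * ((n : ℤ) - 2 * k) * ((n : ℤ) - 2 * k - 1) := by
  obtain ⟨r, rfl⟩ : ∃ r, n = 2 * k + 2 + r := ⟨n - (2 * k + 2), by omega⟩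
  rcases r with _ | r'
  · -- n = 2*(k+1) : last coefficient
    have hs := hstep (2 * k + 2 + 0) k (by omega) (by omega)
    rw [show 2 * k + 2 + 0 - k - 1 = k + 1 from by omega,
        show 2 * k + 2 + 0 - 2 * k = 2 from by omega,
        show (2 : ℕ) - 1 = 1 from rfl,
        show hC (2 * k + 2 + 0) (k + 1) = 2 from by
          rw [show 2 * k + 2 + 0 = 2 * (k + 1) from by omega]; exact htwo (k + 1) (by omega)] at hs
    have hval : hC (2 * k + 2 + 0) k = (k + 1) * (k + 1) := by
      apply Nat.eq_of_mul_eq_mul_left (show 0 < 2 from by omega)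
      omega
    unfold gC
    rw [if_pos (by omega), if_neg (by omega)]
    rw [show 2 * k + 2 + 0 - 2 * k - 1 = 1 from by omega, hval]
    push_cast
    rw [pow_succ]
    ring
  · rw [show (2 * k + 2 + (r' + 1) : ℕ) = 2 * k + 3 + r' from by omega] at *
    have hs := hstep (2 * k + 3 + r') k (by omega) (by omega)
    rw [show 2 * k + 3 + r' - k - 1 = k + 2 + r' from by omega,
        show 2 * k + 3 + r' - 2 * k = r' + 3 from by omega,
        show r' + 3 - 1 = r' + 2 from by omega] at hs
    have hsz : ((hC (2 * k + 3 + r') (k + 1) : ℕ) : ℤ) * ((k + 1) * (k + 2 + r')) =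
        ((hC (2 * k + 3 + r') k : ℕ) : ℤ) * ((r' + 3) * (r' + 2)) := by
      exact_mod_cast hs
    unfold gC
    rw [if_neg (by omega), if_neg (by omega)]
    rw [show 2 * k + 3 + r' - 2 * (k + 1) - 1 = r' from by omega,
        show 2 * k + 3 + r' - 2 * k - 1 = r' + 2 from by omega]
    push_cast
    rw [pow_succ ((-1 : ℤ)) k, pow_succ (2 : ℤ) (r' + 1), pow_succ (2 : ℤ) r']
    linear_combination (-4 : ℤ) * (-1 : ℤ) ^ k * 2 ^ r' * hsz

-- A-side recurrence on gC
lemma grec (m k : ℕ) (hm : 1 ≤ m) (hk : 1 ≤ k) (hkm : 2 * k ≤ m) :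
    gC (m + 1) k = 2 * gC m k - gC (m - 1) (k - 1) := by
  obtain ⟨k', rfl⟩ : ∃ k', k = k' + 1 := ⟨k - 1, by omega⟩
  obtain ⟨r, rfl⟩ : ∃ r, m = 2 * k' + 2 + r := ⟨m - (2 * k' + 2), by omega⟩
  have hh := hrec (2 * k' + 2 + r) (k' + 1) (by omega) (by omega)
  rw [show 2 * k' + 2 + r - 1 = 2 * k' + 1 + r from by omega,
      show k' + 1 - 1 = k' from by omega] at hh
  have hhz : ((hC (2 * k' + 2 + r + 1) (k' + 1) : ℕ) : ℤ) =
      hC (2 * k' + 2 + r) (k' + 1) + hC (2 * k' + 1 + r) k' := by exact_mod_cast hh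
  rcases r with _ | r'
  · unfold gC
    rw [if_neg (by omega), if_pos (by omega), if_neg (by omega)]
    rw [show 2 * k' + 2 + 0 + 1 - 2 * (k' + 1) - 1 = 0 from by omega,
        show k' + 1 - 1 = k' from by omega,
        show 2 * k' + 2 + 0 - 1 = 2 * k' + 1 + 0 from by omega,
        show 2 * k' + 1 + 0 - 2 * k' - 1 = 0 from by omega]
    rw [pow_succ ((-1 : ℤ)) k']
    rw [hhz, show hC (2 * k' + 2 + 0) (k' + 1) = 2 from by
          rw [show 2 * k' + 2 + 0 = 2 * (k' + 1) from by omega]; exact htwo (k' + 1) (by omega)]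
    push_cast
    ring
  · unfold gC
    rw [if_neg (by omega), if_neg (by omega), if_neg (by omega)]
    rw [show 2 * k' + 2 + (r' + 1) + 1 - 2 * (k' + 1) - 1 = r' + 1 from by omega,
        show 2 * k' + 2 + (r' + 1) - 2 * (k' + 1) - 1 = r' from by omega,
        show k' + 1 - 1 = k' from by omega,
        show 2 * k' + 2 + (r' + 1) - 1 = 2 * k' + 1 + (r' + 1) from by omega,
        show 2 * k' + 1 + (r' + 1) - 2 * k' - 1 = r' + 1 from by omega]
    rw [show (2 * k' + 1 + (r' + 1) : ℕ) = 2 * k' + 1 + r' + 1 from by omega] at *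
    rw [show (2 * k' + 2 + (r' + 1) + 1 : ℕ) = 2 * k' + 2 + r' + 1 + 1 from by omega] at *
    rw [show (2 * k' + 2 + (r' + 1) : ℕ) = 2 * k' + 2 + r' + 1 from by omega] at *
    rw [hhz]
    push_cast
    rw [pow_succ ((-1 : ℤ)) k', pow_succ (2 : ℤ) r']
    ring

lemma hC_zero (n : ℕ) : hC n 0 = 1 := by simp [hC]

lemma gzero (m : ℕ) (hm : 1 ≤ m) : gC (m + 1) 0 = 2 * gC m 0 := by
  unfold gC
  rw [if_neg (by omega), if_neg (by omega)]
  rw [hC_zero, hC_zero]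
  rw [show m + 1 - 2 * 0 - 1 = (m - 2 * 0 - 1) + 1 from by omega, pow_succ]
  push_cast
  ring

-- coefficient recurrence, list-entry form
lemma crec (m j : ℕ) (hm : 1 ≤ m) (hj : j ≤ m + 1) :
    coefC (m + 1) j =
      (if 1 ≤ j ∧ j ≤ m + 1 then 2 * coefC m (j - 1) else 0) -
      (if j < m then coefC (m - 1) j else 0) := by
  by_cases hpar : (m + 1 - j) % 2 = 0
  · by_cases hj0 : j = 0
    · subst hj0
      unfold coefC
      rw [if_pos ⟨hpar, by omega⟩, if_neg (by omega), if_pos (by omega),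
          if_pos (show (m - 1 - 0) % 2 = 0 ∧ 0 ≤ m - 1 from ⟨by omega, by omega⟩)]
      unfold gC
      rw [if_pos (by omega), if_pos (by omega)]
      rw [show (m + 1 - 0) / 2 = (m - 1 - 0) / 2 + 1 from by omega, pow_succ]
      ring
    · by_cases hjm : j = m + 1
      · subst hjm
        unfold coefC
        rw [if_pos ⟨hpar, by omega⟩, if_pos (by omega),
            if_pos (show (m - (m + 1 - 1)) % 2 = 0 ∧ m + 1 - 1 ≤ m from ⟨by omega, by omega⟩),
            if_neg (show ¬(m + 1 < m) from by omega)]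
        rw [show (m + 1 - (m + 1)) / 2 = 0 from by omega,
            show (m - (m + 1 - 1)) / 2 = 0 from by omega]
        rw [gzero m hm]
        ring
      · have hj1 : 1 ≤ j := by omega
        have hjle : j + 2 ≤ m + 1 := by omega
        unfold coefC
        rw [if_pos ⟨hpar, by omega⟩, if_pos ⟨hj1, by omega⟩,
            if_pos (show (m - (j - 1)) % 2 = 0 ∧ j - 1 ≤ m from ⟨by omega, by omega⟩),
            if_pos (show j < m from by omega),
            if_pos (show (m - 1 - j) % 2 = 0 ∧ j ≤ m - 1 from ⟨by omega, by omega⟩)]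
        rw [show (m - (j - 1)) / 2 = (m + 1 - j) / 2 from by omega,
            show (m - 1 - j) / 2 = (m + 1 - j) / 2 - 1 from by omega]
        exact grec m ((m + 1 - j) / 2) hm (by omega) (by omega)
  · unfold coefC
    rw [if_neg (by omega)]
    split_ifs with h1 h2 h3 h4 h5 h6
    all_goals first
      | (exfalso; omega)
      | norm_num

-- ---- list helpers ----

lemma getD_set' (xs : List ℤ) (i j : ℕ) (a : ℤ) :
    (xs.set i a).getD j 0 = if i = j ∧ j < xs.length then a else xs.getD j 0 := by
  rw [List.getD_eq_getElem?_getD, List.getD_eq_getElem?_getD, List.getElem?_set]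
  by_cases hij : i = j
  · subst hij
    by_cases hlen : i < xs.length
    · simp [hlen]
    · simp [hlen, List.getElem?_eq_none (show xs.length ≤ i from by omega)]
  · simp [hij]

lemma getD_oob (xs : List ℤ) (j : ℕ) (h : xs.length ≤ j) : xs.getD j 0 = 0 := by
  rw [List.getD_eq_getElem?_getD, List.getElem?_eq_none h]; rfl

lemma getD_map_range' (f : ℕ → ℤ) (n j : ℕ) :
    (((List.range n).map f).getD j 0) = if j < n then f j else 0 := by
  by_cases h : j < n
  · rw [List.getD_eq_getElem?_getD]
    simp [List.getElem?_map, List.getElem?_range h, h]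
  · rw [getD_oob _ _ (by simp; omega)]
    simp [h]

-- ---- generic fold characterisations ----

lemma fold1_spec (v init : List ℤ) (L : ℕ) (h : L + 1 ≤ init.length) :
    ∃ r : List ℤ,
      (List.range L).foldl
        (fun acc k => acc.set (k + 1) (acc.getD (k + 1) 0 + 2 * v.getD k 0)) init = r ∧
      r.length = init.length ∧
      ∀ j, r.getD j 0 = if 1 ≤ j ∧ j ≤ L then init.getD j 0 + 2 * v.getD (j - 1) 0
                        else init.getD j 0 := by
  induction L with
  | zero =>
    exact ⟨init, rfl, rfl, fun j => by rw [if_neg (by omega)]⟩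
  | succ L ih =>
    obtain ⟨r, hr, hlen, hget⟩ := ih (by omega)
    refine ⟨r.set (L + 1) (r.getD (L + 1) 0 + 2 * v.getD L 0), ?_, ?_, ?_⟩
    · rw [List.range_succ, List.foldl_append, hr]
      rfl
    · rw [List.length_set, hlen]
    · intro j
      rw [getD_set']
      by_cases hj : j = L + 1
      · subst hj
        rw [if_pos ⟨rfl, by omega⟩, if_pos (by omega)]
        rw [hget (L + 1), if_neg (by omega)]
        simp
      · rw [if_neg (by omega), hget j]
        by_cases h1 : 1 ≤ j ∧ j ≤ L
        · rw [if_pos h1, if_pos (by omega)]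
        · rw [if_neg h1, if_neg (by omega)]

lemma fold2_spec (v init : List ℤ) (L : ℕ) (h : L ≤ init.length) :
    ∃ r : List ℤ,
      (List.range L).foldl
        (fun acc k => acc.set k (acc.getD k 0 - v.getD k 0)) init = r ∧
      r.length = init.length ∧
      ∀ j, r.getD j 0 = if j < L then init.getD j 0 - v.getD j 0 else init.getD j 0 := by
  induction L with
  | zero =>
    exact ⟨init, rfl, rfl, fun j => by rw [if_neg (by omega)]⟩
  | succ L ih =>
    obtain ⟨r, hr, hlen, hget⟩ := ih (by omega)
    refine ⟨r.set L (r.getD L 0 - v.getD L 0), ?_, ?_, ?_⟩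
    · rw [List.range_succ, List.foldl_append, hr]
      rfl
    · rw [List.length_set, hlen]
    · intro j
      rw [getD_set']
      by_cases hj : j = L
      · subst hj
        rw [if_pos ⟨rfl, by omega⟩, if_pos (by omega)]
        rw [hget j, if_neg (by omega)]
      · rw [if_neg (by omega), hget j]
        by_cases h1 : j < L
        · rw [if_pos h1, if_pos (by omega)]
        · rw [if_neg h1, if_neg (by omega)]

lemma getD_replicate0 (n j : ℕ) : (List.replicate n (0 : ℤ)).getD j 0 = 0 := by
  rw [List.getD_eq_getElem?_getD, List.getElem?_replicate]
  split_ifs <;> rfl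

lemma foldl_pyRange_cast {α : Type} (L : ℕ) (f : α → Int → α) (init : α) :
    (PySem.List.pyRange 0 (L : Int) 1).foldl f init =
    (List.range L).foldl (fun a (k : ℕ) => f a (k : Int)) init := by
  rw [PySem.List.pyRange_one, show ((L : Int) - 0).toNat = L from by omega, List.foldl_map]
  simp only [zero_add]

-- ---- A side ----

lemma stepA_spec (m : ℕ) (hm : 1 ≤ m) :
    stepA (LC (m - 1)) (LC m) ((m : Int) + 1) = LC (m + 1) := by
  unfold stepA
  rw [show ((m : Int) + 1 + 1).toNat = m + 2 from by omega]
  rw [length_LC, length_LC]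
  rw [foldl_pyRange_cast, foldl_pyRange_cast]
  simp only [show ∀ k : ℕ, ((k : Int) + 1) = ((k + 1 : ℕ) : Int) from fun k => by push_cast; ring,
      PySem.List.pySetD_natCast, PySem.List.pyGetD_natCast]
  rw [show m - 1 + 1 = m from by omega]
  obtain ⟨r1, hr1, hlen1, hget1⟩ :=
    fold1_spec (LC m) (List.replicate (m + 2) 0) (m + 1)
      (by rw [List.length_replicate])
  rw [hr1]
  obtain ⟨r2, hr2, hlen2, hget2⟩ :=
    fold2_spec (LC (m - 1)) r1 m (by rw [hlen1, List.length_replicate]; omega)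
  rw [hr2]
  apply List.ext_getElem
  · rw [hlen2, hlen1, List.length_replicate, length_LC]
  · intro j h1 h2
    rw [← List.getD_eq_getElem r2 0 h1, ← List.getD_eq_getElem (LC (m + 1)) 0 h2]
    have hj2 : j < m + 2 := by
      rw [hlen2, hlen1, List.length_replicate] at h1; exact h1
    rw [hget2 j, hget1 j, getD_replicate0]
    rw [show LC (m + 1) = (List.range (m + 1 + 1)).map (coefC (m + 1)) from rfl,
        getD_map_range', if_pos (show j < m + 1 + 1 from by omega)]
    rw [crec m j hm (by omega)]
    rw [show LC m = (List.range (m + 1)).map (coefC m) from rfl,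
        show LC (m - 1) = (List.range (m - 1 + 1)).map (coefC (m - 1)) from rfl,
        getD_map_range', getD_map_range']
    split_ifs <;> (try ring) <;> omega

lemma loopA_spec (M : ℕ) (hM : 1 ≤ M) :
    ((PySem.List.pyRange 2 ((M : Int) + 1) 1).foldl
        (fun (st : List Int × List Int) k => (st.2, stepA st.1 st.2 k))
        ([1], [0, 1])) = (LC (M - 1), LC M) := by
  induction M with
  | zero => omega
  | succ M ih =>
    rcases Nat.eq_zero_or_pos M with rfl | hM
    · rw [show ((1 : ℕ) : Int) + 1 = 2 from by norm_num,
          PySem.List.pyRange_one_eq_nil (by omega)]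
      simp [LC_zero, LC_one]
    · rw [show ((M + 1 : ℕ) : Int) + 1 = ((M : Int) + 1) + 1 from by push_cast; ring]
      rw [PySem.List.pyRange_one_succ_right (by omega), List.foldl_append]
      rw [ih hM]
      simp only [List.foldl_cons, List.foldl_nil]
      rw [stepA_spec M hM]
      rw [show M + 1 - 1 = M from by omega]

-- ---- B side ----

def PB (N j i : ℕ) : ℤ := if (N - i) % 2 = 0 ∧ N < i + 2 * j then gC N ((N - i) / 2) else 0

lemma map_PB_zero (N : ℕ) : (List.range (N + 1)).map (PB N 0) = List.replicate (N + 1) 0 := by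
  apply List.ext_getElem
  · simp
  · intro i h1 h2
    simp only [List.getElem_map, List.getElem_range, List.getElem_replicate]
    simp only [List.length_map, List.length_range] at h1
    unfold PB
    rw [if_neg (by omega)]

lemma gC_zero (N : ℕ) (hN : 1 ≤ N) : gC N 0 = 2 ^ (N - 1) := by
  unfold gC
  rw [if_neg (by omega), hC_zero, show N - 2 * 0 - 1 = N - 1 from by omega]
  simp

lemma set_PB (N j : ℕ) (hN : 1 ≤ N) (hj : j < N / 2) :
    ((List.range (N + 1)).map (PB N j)).set (N - 2 * j) (gC N j) =
    (List.range (N + 1)).map (PB N (j + 1)) := by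
  apply List.ext_getElem
  · simp
  · intro i h1 h2
    simp only [List.length_set, List.length_map, List.length_range] at h1 h2
    rw [← List.getD_eq_getElem _ 0, ← List.getD_eq_getElem _ 0]
    rw [getD_set', getD_map_range', getD_map_range']
    simp only [List.length_map, List.length_range]
    by_cases hi : N - 2 * j = i
    · rw [if_pos (show N - 2 * j = i ∧ i < N + 1 from ⟨hi, by omega⟩)]
      subst hi
      unfold PB
      rw [if_pos (show N - 2 * j < N + 1 from by omega),
          if_pos (show (N - (N - 2 * j)) % 2 = 0 ∧ N < (N - 2 * j) + 2 * (j + 1) from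
            ⟨by omega, by omega⟩),
          show (N - (N - 2 * j)) / 2 = j from by omega]
    · rw [if_neg (show ¬(N - 2 * j = i ∧ i < N + 1) from by omega),
          if_pos (show i < N + 1 from by omega)]
      unfold PB
      split_ifs <;> first | rfl | omega | (exfalso; omega)

lemma loopB_spec (N : ℕ) (hN : 1 ≤ N) (j : ℕ) (hj : j ≤ N / 2) :
    (List.range j).foldl
      (fun (st : List Int × Int) (k : ℕ) =>
        (PySem.List.pySetD st.1 ((N : Int) - 2 * (k : Int)) st.2,
         PySem.Int.floordiv (-st.2 * ((N : Int) - 2 * (k : Int)) * ((N : Int) - 2 * (k : Int) - 1))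
                            (4 * ((k : Int) + 1) * ((N : Int) - (k : Int) - 1))))
      (List.replicate (N + 1) 0, 2 ^ (N - 1))
    = ((List.range (N + 1)).map (PB N j), gC N j) := by
  induction j with
  | zero =>
    rw [List.range_zero, List.foldl_nil, map_PB_zero, gC_zero N hN]
  | succ j ih =>
    rw [List.range_succ, List.foldl_append, ih (by omega), List.foldl_cons, List.foldl_nil]
    have h2j : 2 * (j + 1) ≤ N := by omega
    have hint : ((N : Int) - 2 * (j : Int)) = ((N - 2 * j : ℕ) : Int) := by push_cast; omega
    have hd : (0 : ℤ) < 4 * ((j : Int) + 1) * ((N : Int) - (j : Int) - 1) := by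
      have h1 : (0 : ℤ) < (N : Int) - (j : Int) - 1 := by omega
      have h2 : (0 : ℤ) < 4 * ((j : Int) + 1) := by positivity
      exact mul_pos h2 h1
    dsimp only
    rw [Prod.mk.injEq]
    constructor
    · rw [hint, PySem.List.pySetD_natCast]
      exact set_PB N j hN (by omega)
    · rw [PySem.Int.floordiv_eq_ediv_of_pos hd]
      rw [show -gC N j * ((N : Int) - 2 * (j : Int)) * ((N : Int) - 2 * (j : Int) - 1) =
            gC N (j + 1) * (4 * ((j : Int) + 1) * ((N : Int) - (j : Int) - 1)) from by
        rw [estep N j hN h2j]]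
      rw [Int.mul_ediv_cancel _ (ne_of_gt hd)]

lemma altB_spec (N : ℕ) (hN : 1 ≤ N) :
    generate_chebychev_polynomial_alt (N : Int) = LC N := by
  unfold generate_chebychev_polynomial_alt
  rw [if_neg (by omega)]
  rw [show PySem.Int.floordiv (N : Int) 2 = ((N / 2 : ℕ) : Int) from by
        exact_mod_cast PySem.Int.floordiv_natCast N 2]
  rw [show ((N : Int) + 1).toNat = N + 1 from by omega,
      show ((N : Int) - 1).toNat = N - 1 from by omega]
  rw [foldl_pyRange_cast]
  simp only []
  rw [loopB_spec N hN (N / 2) le_rfl]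
  rw [show PySem.Int.mod (N : Int) 2 = ((N % 2 : ℕ) : Int) from by
        exact_mod_cast PySem.Int.mod_natCast N 2]
  rw [PySem.List.pySetD_natCast]
  apply List.ext_getElem
  · simp [LC]
  · intro i h1 h2
    simp only [List.length_set, List.length_map, List.length_range, LC] at h1 h2
    rw [← List.getD_eq_getElem _ 0, ← List.getD_eq_getElem _ 0]
    rw [getD_set', getD_map_range']
    rw [show LC N = (List.range (N + 1)).map (coefC N) from rfl, getD_map_range']
    simp only [List.length_map, List.length_range]
    rw [if_pos (show i < N + 1 from by omega)]
    by_cases hi : N % 2 = i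
    · rw [if_pos (show N % 2 = i ∧ i < N + 1 from ⟨hi, by omega⟩)]
      subst hi
      unfold coefC
      rw [if_pos (show (N - N % 2) % 2 = 0 ∧ N % 2 ≤ N from ⟨by omega, by omega⟩),
          show (N - N % 2) / 2 = N / 2 from by omega,
          if_pos (show N % 2 < N + 1 from by omega)]
    · rw [if_neg (show ¬(N % 2 = i ∧ i < N + 1) from by omega)]
      unfold PB coefC
      split_ifs <;> first | rfl | omega | (exfalso; omega)

-- ===== VERDICT (by name: the statement is the Claim_ definition above) =====
theorem generate_chebychev_polynomial_spec : Claim_equal_generate_chebychev_polynomial := by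
  intro n hdom hpre
  unfold Spec_generate_chebychev_polynomial
  rcases show n = 0 ∨ n = 1 ∨ 2 ≤ n from by
      unfold Pre_generate_chebychev_polynomial at hpre; omega with h | h | h
  · subst h; decide
  · subst h; decide
  · obtain ⟨N, rfl⟩ : ∃ N : ℕ, n = (N : Int) := ⟨n.toNat, by omega⟩
    have hN : 2 ≤ N := by exact_mod_cast h
    rw [altB_spec N (by omega)]
    unfold generate_chebychev_polynomial
    rw [if_neg (by omega), if_neg (by omega)]
    rw [show ((N : Int) + 1) = ((N : Int) + 1) from rfl]
    rw [loopA_spec N (by omega)]
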